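-- pv_equiv track=rewrite | github.com/cxfyxl/xformparser | layoutlmft/data/utils.py | group_by_threshold
-- ===== SOURCE A (Python) =====
-- def group_by_threshold(lst, threshold):
--     lst.sort()
--     result = []
--     current_group = [lst[0]]
--     for i in range(1, len(lst)):
--         if lst[i] - current_group[-1] <= threshold:
--             current_group.append(lst[i])
--         else:
--             result.append(current_group)
--             current_group = [lst[i]]
--     result.append(current_group)
--     i = 0
--     index_dict = {}
--     for group in result:
--         for id in group:
--             index_dict[id] = i
--         i+=1
--     return index_dict
-- ===== SOURCE B (Python) =====
-- def group_by_threshold(lst, threshold):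
--     # Single linear pass keeping only the previous element and a running group
--     # index; no intermediate list-of-groups and no second reindexing loop.
--     # Like A, sorts lst in place (same observable mutation).
--     lst.sort()
--     index_dict = {lst[0]: 0}
--     idx = 0
--     prev = lst[0]
--     for x in lst[1:]:
--         if x - prev > threshold:
--             idx += 1
--         index_dict[x] = idx
--         prev = x
--     return index_dict
-- ===== Notes on version B (the rewrite author's own statement) =====
-- stated objective: simpler
-- what changed: B replaces A's two-phase algorithm (build a list of groups, then a nested reindexing loop over the groups) by a single linear pass that keeps only the previous element and a running group index, assigning each element its index directly.
import Mathlib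
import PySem

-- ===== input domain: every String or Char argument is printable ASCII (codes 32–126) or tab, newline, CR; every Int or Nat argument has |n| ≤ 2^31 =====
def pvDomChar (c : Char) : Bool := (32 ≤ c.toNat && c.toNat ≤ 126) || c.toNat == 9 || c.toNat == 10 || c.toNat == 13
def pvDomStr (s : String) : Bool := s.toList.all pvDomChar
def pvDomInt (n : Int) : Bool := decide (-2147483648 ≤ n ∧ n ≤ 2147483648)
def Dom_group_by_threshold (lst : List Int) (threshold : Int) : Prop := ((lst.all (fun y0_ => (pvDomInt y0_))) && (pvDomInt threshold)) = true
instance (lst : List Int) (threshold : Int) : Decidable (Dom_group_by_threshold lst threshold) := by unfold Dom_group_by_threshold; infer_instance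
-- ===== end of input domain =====

-- B replaces A's two-phase grouping (group list + nested reindexing loop) by one
-- linear pass with only the previous element and a running index (objective: simpler).
-- Both A and B sort lst in place; equivalence here is about the RETURN value.

-- ===== PORT A =====
def group_by_threshold (lst : List Int) (threshold : Int) : List (Int × Int) :=
  let s := PySem.List.sorted lst (fun x => x) false            -- lst.sort()
  match s with
  | [] => []                                                    -- Python: lst[0] raises IndexError; excluded by Pre_
  | h :: _ =>
    -- for i in range(1, len(lst)): grow current_group or flush it to result
    let st := (PySem.List.pyRange 1 (s.length : Int) 1).foldl
      (fun (st : List (List Int) × List Int) i =>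
        let x := PySem.List.pyGetD s i 0                        -- lst[i]; i is in range along the loop
        if x - PySem.List.pyGetD st.2 (-1) 0 ≤ threshold then   -- current_group[-1]; group never empty
          (st.1, st.2 ++ [x])
        else
          (st.1 ++ [st.2], [x]))
      (([] : List (List Int)), [h])
    let result := st.1 ++ [st.2]                                -- result.append(current_group)
    -- i = 0; for group in result: for id in group: index_dict[id] = i; i += 1
    let fin := result.foldl
      (fun (p : PySem.Dict Int Int × Int) group =>
        (group.foldl (fun d id => d.insert id p.2) p.1, p.2 + 1))
      ((PySem.Dict.empty : PySem.Dict Int Int), 0)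
    fin.1.items

-- ===== PORT B =====
def group_by_threshold_alt (lst : List Int) (threshold : Int) : List (Int × Int) :=
  let s := PySem.List.sorted lst (fun x => x) false             -- lst.sort()
  match s with
  | [] => []                                                    -- Python: lst[0] raises IndexError; excluded by Pre_
  | h :: _ =>
    -- index_dict = {lst[0]: 0}; idx = 0; prev = lst[0]; for x in lst[1:]: …
    let st := (PySem.List.slice s (some 1) none).foldl
      (fun (st : PySem.Dict Int Int × Int × Int) x =>
        let idx := if x - st.2.2 > threshold then st.2.1 + 1 else st.2.1
        (st.1.insert x idx, idx, x))
      (((PySem.Dict.empty : PySem.Dict Int Int).insert h 0), 0, h)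
    st.1.items

-- ===== PRECONDITION & SPEC =====
-- Python A (and B) raises IndexError on the empty list (lst[0]); Pre_ excludes exactly that.
def Pre_group_by_threshold (lst : List Int) (threshold : Int) : Prop := lst ≠ []
instance (lst : List Int) (threshold : Int) : Decidable (Pre_group_by_threshold lst threshold) := by unfold Pre_group_by_threshold; infer_instance
def pvWitness_group_by_threshold : List Int × Int := ([1, 3, 10, 2], 2)

def Spec_group_by_threshold (lst : List Int) (threshold : Int) (out : List (Int × Int)) : Prop := out = group_by_threshold_alt lst threshold
instance (lst : List Int) (threshold : Int) (out : List (Int × Int)) : Decidable (Spec_group_by_threshold lst threshold out) := by unfold Spec_group_by_threshold; infer_instance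

-- ===== CLAIM (what is proved, stated in full; the proofs are below) =====
def Claim_equal_group_by_threshold : Prop := ∀ (lst : List Int) (threshold : Int), Dom_group_by_threshold lst threshold → Pre_group_by_threshold lst threshold → Spec_group_by_threshold lst threshold (group_by_threshold lst threshold)

-- ===== LEMMAS AND PROOFS =====

/-- fold of `Dict.insert` over an explicit pair list. -/
def pvIns (d : PySem.Dict Int Int) (ps : List (Int × Int)) : PySem.Dict Int Int :=
  ps.foldl (fun d p => d.insert p.1 p.2) d

theorem pvIns_append (d : PySem.Dict Int Int) (ps qs : List (Int × Int)) :
    pvIns d (ps ++ qs) = pvIns (pvIns d ps) qs := by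
  simp [pvIns, List.foldl_append]

/-- the groups A's first loop produces, from a current group `cur` onward. -/
def pvGroups (th : Int) : List Int → List Int → List (List Int)
  | [], cur => [cur]
  | x :: t, cur =>
    if x - PySem.List.pyGetD cur (-1) 0 ≤ th then pvGroups th t (cur ++ [x])
    else cur :: pvGroups th t [x]

/-- flatten groups into (element, group-index) pairs starting at index i. -/
def pvFlat : List (List Int) → Int → List (Int × Int)
  | [], _ => []
  | g :: gs, i => g.map (fun v => (v, i)) ++ pvFlat gs (i + 1)

/-- the (key, value) inserts B's loop performs. -/
def pvPairsB (th : Int) : List Int → Int → Int → List (Int × Int)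
  | [], _, _ => []
  | x :: t, prev, idx =>
    let i := if x - prev > th then idx + 1 else idx
    (x, i) :: pvPairsB th t x i

theorem pvA_loop (th : Int) (t : List Int) :
    ∀ (res : List (List Int)) (cur : List Int),
      (t.foldl
        (fun (st : List (List Int) × List Int) x =>
          if x - PySem.List.pyGetD st.2 (-1) 0 ≤ th then (st.1, st.2 ++ [x])
          else (st.1 ++ [st.2], [x])) (res, cur)).1
      ++ [(t.foldl
        (fun (st : List (List Int) × List Int) x =>
          if x - PySem.List.pyGetD st.2 (-1) 0 ≤ th then (st.1, st.2 ++ [x])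
          else (st.1 ++ [st.2], [x])) (res, cur)).2]
      = res ++ pvGroups th t cur := by
  induction t with
  | nil => intro res cur; simp [pvGroups]
  | cons x t ih =>
    intro res cur
    simp only [List.foldl_cons, pvGroups]
    by_cases h : x - PySem.List.pyGetD cur (-1) 0 ≤ th
    · simp only [if_pos h]; exact ih res (cur ++ [x])
    · simp only [if_neg h]
      rw [ih (res ++ [cur]) [x]]
      simp

theorem pvIns_map_const (d : PySem.Dict Int Int) (g : List Int) (i : Int) :
    g.foldl (fun d id => d.insert id i) d = pvIns d (g.map (fun v => (v, i))) := by
  induction g generalizing d with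
  | nil => simp [pvIns]
  | cons v g ih => simp [pvIns, List.foldl_cons] at *; exact ih _

theorem pvA_dict (gs : List (List Int)) :
    ∀ (d : PySem.Dict Int Int) (i : Int),
      (gs.foldl
        (fun (p : PySem.Dict Int Int × Int) group =>
          (group.foldl (fun d id => d.insert id p.2) p.1, p.2 + 1)) (d, i)).1
      = pvIns d (pvFlat gs i) := by
  induction gs with
  | nil => intro d i; simp [pvFlat, pvIns]
  | cons g gs ih =>
    intro d i
    rw [List.foldl_cons, ih]
    simp only [pvFlat, pvIns_append, ← pvIns_map_const]

theorem pvB_loop (th : Int) (t : List Int) :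
    ∀ (d : PySem.Dict Int Int) (idx prev : Int),
      (t.foldl
        (fun (st : PySem.Dict Int Int × Int × Int) x =>
          let idx := if x - st.2.2 > th then st.2.1 + 1 else st.2.1
          (st.1.insert x idx, idx, x)) (d, idx, prev)).1
      = pvIns d (pvPairsB th t prev idx) := by
  induction t with
  | nil => intro d idx prev; simp [pvPairsB, pvIns]
  | cons x t ih =>
    intro d idx prev
    simp only [List.foldl_cons, pvPairsB, ih, pvIns, List.foldl_cons]

theorem pvMain (th : Int) (t : List Int) :
    ∀ (cur : List Int) (idx : Int), cur ≠ [] →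
      pvFlat (pvGroups th t cur) idx
      = cur.map (fun v => (v, idx)) ++ pvPairsB th t (PySem.List.pyGetD cur (-1) 0) idx := by
  induction t with
  | nil => intro cur idx _; simp [pvGroups, pvFlat, pvPairsB]
  | cons x t ih =>
    intro cur idx hcur
    simp only [pvGroups]
    by_cases h : x - PySem.List.pyGetD cur (-1) 0 ≤ th
    · rw [if_pos h, ih (cur ++ [x]) idx (by simp)]
      simp only [pvPairsB, PySem.List.pyGetD_neg_one_append_singleton, List.map_append,
        List.map_cons, List.map_nil, List.append_assoc, List.singleton_append]
      have : ¬ (x - PySem.List.pyGetD cur (-1) 0 > th) := not_lt.mpr h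
      simp [this]
    · rw [if_neg h]
      simp only [pvFlat, ih [x] (idx + 1) (by simp), pvPairsB]
      have hx : PySem.List.pyGetD [x] (-1) 0 = x := by
        rw [PySem.List.pyGetD_neg_one [x] 0 (List.cons_ne_nil x [])]; simp
      have hgt : x - PySem.List.pyGetD cur (-1) 0 > th := lt_of_not_ge h
      simp [hx, hgt]

-- ===== VERDICT (by name: the statement is the Claim_ definition above) =====
theorem group_by_threshold_spec : Claim_equal_group_by_threshold := by
  intro lst threshold _ hpre
  unfold Spec_group_by_threshold group_by_threshold group_by_threshold_alt
  have hs : PySem.List.sorted lst (fun x => x) false ≠ [] := by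
    rw [Ne, PySem.List.sorted_eq_nil_iff]; exact hpre
  obtain ⟨h, t, hst⟩ := List.exists_cons_of_ne_nil hs
  simp only [hst]
  -- bridge A's index loop over range(1, len) to a fold over the tail t
  rw [PySem.List.foldl_pyRange_pyGetD' (h :: t) 0
      (fun (st : List (List Int) × List Int) x =>
        if x - PySem.List.pyGetD st.2 (-1) 0 ≤ threshold then (st.1, st.2 ++ [x])
        else (st.1 ++ [st.2], [x]))
      (([] : List (List Int)), [h]) (a := 1) (by omega)]
  simp only [Int.toNat_one, List.drop_succ_cons, List.drop_zero]
  -- B's lst[1:] is the tail t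
  rw [PySem.List.slice_from_one]
  simp only [List.tail_cons]
  rw [pvA_dict, pvA_loop, pvB_loop]
  have := pvMain threshold t [h] 0 (by simp)
  simp only [List.nil_append]
  rw [this]
  have hh : PySem.List.pyGetD [h] (-1) 0 = h := by
    rw [PySem.List.pyGetD_neg_one [h] 0 (List.cons_ne_nil h [])]; simp
  simp only [hh, List.map_cons, List.map_nil, List.singleton_append]
  rfl
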